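-- pv_equiv track=rewrite | github.com/sutazai/sutazaiapp | scripts/advanced_syntax_repair.py | fix_comment_blocks
-- ===== SOURCE A (Python) =====
-- def fix_comment_blocks(content: str) -> str:
--     """Fix incomplete comment blocks or malformed comments."""
--     lines = content.split('\n')
--     in_comment_block = False
--     comment_indent = 0
--
--     for i in range(len(lines)):
--         stripped = lines[i].strip()
--
--         # Handle block comments that might be causing issues
--         if stripped.startswith('#'):
--             indent = len(lines[i]) - len(lines[i].lstrip())
--
--             # Start of a comment block
--             if not in_comment_block and i > 0 and not lines[i-1].strip().startswith('#'):
--                 in_comment_block = True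
--                 comment_indent = indent
--
--             # Continue comment block
--             if in_comment_block:
--                 # Fix inconsistent indentation in comment blocks
--                 if indent != comment_indent and stripped != '#':
--                     lines[i] = ' ' * comment_indent + stripped
--         else:
--             in_comment_block = False
--
--     return '\n'.join(lines)
-- ===== SOURCE B (Python) =====
-- def _is_comment(line):
--     return line.strip().startswith('#')
--
--
-- def _span(lines):
--     """Longest prefix of comment lines, and the remainder."""
--     k = 0
--     while k < len(lines) and _is_comment(lines[k]):
--         k += 1
--     return lines[:k], lines[k:]
--
--
-- def _norm(line, target):
--     s = line.strip()
--     if len(line) - len(line.lstrip()) != target and s != '#':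
--         return ' ' * target + s
--     return line
--
--
-- def fix_comment_blocks(content: str) -> str:
--     lines = content.split('\n')
--     out = []
--     rest = lines
--     at_start = True
--     while rest:
--         head = rest[0]
--         if _is_comment(head):
--             run, rest = _span(rest[1:])
--             out.append(head)
--             if at_start:
--                 out.extend(run)
--             else:
--                 target = len(head) - len(head.lstrip())
--                 out.extend(_norm(l, target) for l in run)
--         else:
--             out.append(head)
--             rest = rest[1:]
--         at_start = False
--     return '\n'.join(out)
-- ===== Notes on version B (the rewrite author's own statement) =====
-- stated objective: alternative
-- what changed: A's single stateful index loop (in_comment_block flag + running comment_indent, mutating the line list in place and re-reading the previous line) is replaced by a run-based decomposition: split the lines into maximal runs of comment lines and rewrite each run at once to its first line's indentation (runs starting at line 0 left untouched).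
import Mathlib
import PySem

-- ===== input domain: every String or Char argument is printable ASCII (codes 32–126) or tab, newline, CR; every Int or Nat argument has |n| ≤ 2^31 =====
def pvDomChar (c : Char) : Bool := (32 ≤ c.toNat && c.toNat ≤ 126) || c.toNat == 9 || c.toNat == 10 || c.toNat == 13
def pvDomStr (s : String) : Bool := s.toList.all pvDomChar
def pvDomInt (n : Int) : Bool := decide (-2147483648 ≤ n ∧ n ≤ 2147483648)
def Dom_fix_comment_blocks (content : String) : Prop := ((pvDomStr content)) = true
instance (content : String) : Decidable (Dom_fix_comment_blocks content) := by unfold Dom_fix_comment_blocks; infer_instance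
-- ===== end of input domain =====

-- B replaces A's stateful index loop (flag + running indent, mutating the list in place) by a
-- run-based decomposition: split the lines into maximal comment runs and rewrite each run at once
-- (objective: alternative decomposition, same linear cost).

-- ===== PORT A =====
-- state: (lines, in_comment_block, comment_indent)
def fixA_step (st : List (List Char) × Bool × Nat) (i : Nat) : List (List Char) × Bool × Nat :=
  let lines := st.1
  let stripped := PySem.Chars.strip (lines.getD i [])
  if PySem.Chars.startswith stripped ['#'] = true then
    let indent := (lines.getD i []).length - (PySem.Chars.lstrip (lines.getD i [])).length
    let st2 : Bool × Nat :=
      if st.2.1 = false ∧ 0 < i ∧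
          PySem.Chars.startswith (PySem.Chars.strip (lines.getD (i - 1) [])) ['#'] = false then
        (true, indent)
      else (st.2.1, st.2.2)
    let lines2 :=
      if st2.1 = true ∧ indent ≠ st2.2 ∧ stripped ≠ ['#'] then
        lines.set i (List.replicate st2.2 ' ' ++ stripped)
      else lines
    (lines2, st2.1, st2.2)
  else (lines, false, st.2.2)

def fix_comment_blocks (content : String) : String :=
  let lines := PySem.Chars.splitOn content.toList ['\n']
  let final := (List.range lines.length).foldl fixA_step (lines, false, 0)
  String.ofList (PySem.Chars.join ['\n'] final.1)

-- ===== PORT B =====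
def pvIsComment (l : List Char) : Bool := PySem.Chars.startswith (PySem.Chars.strip l) ['#']

-- longest prefix of comment lines, and the remainder (Source B's _span)
def pvSpan : List (List Char) → List (List Char) × List (List Char)
  | [] => ([], [])
  | l :: t => if pvIsComment l then (l :: (pvSpan t).1, (pvSpan t).2) else ([], l :: t)

theorem pvSpan_snd_len_le : ∀ ls : List (List Char), (pvSpan ls).2.length ≤ ls.length := by
  intro ls
  induction ls with
  | nil => simp [pvSpan]
  | cons l t ih =>
    by_cases h : pvIsComment l = true
    · simp [pvSpan, h]; omega
    · simp [pvSpan, h]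

-- Source B's _norm
def pvNorm (target : Nat) (l : List Char) : List Char :=
  if l.length - (PySem.Chars.lstrip l).length ≠ target ∧ PySem.Chars.strip l ≠ ['#'] then
    List.replicate target ' ' ++ PySem.Chars.strip l
  else l

def pvGo : List (List Char) → Bool → List (List Char)
  | [], _ => []
  | head :: t, atStart =>
    if pvIsComment head then
      (if atStart then head :: (pvSpan t).1
       else head :: ((pvSpan t).1.map (pvNorm (head.length - (PySem.Chars.lstrip head).length)))) ++
        pvGo (pvSpan t).2 false
    else head :: pvGo t false
termination_by ls _ => ls.length
decreasing_by
  · have := pvSpan_snd_len_le t; simp; omega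
  · simp

def fix_comment_blocks_alt (content : String) : String :=
  String.ofList (PySem.Chars.join ['\n'] (pvGo (PySem.Chars.splitOn content.toList ['\n']) true))

-- ===== PRECONDITION & SPEC =====
def Spec_fix_comment_blocks (content : String) (out : String) : Prop := out = fix_comment_blocks_alt content
instance (content : String) (out : String) : Decidable (Spec_fix_comment_blocks content out) := by unfold Spec_fix_comment_blocks; infer_instance

-- ===== CLAIM (what is proved, stated in full; the proofs are below) =====
def Claim_equal_fix_comment_blocks : Prop := ∀ (content : String), Dom_fix_comment_blocks content → Spec_fix_comment_blocks content (fix_comment_blocks content)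

-- ===== LEMMAS AND PROOFS =====

-- ---- string facts: strip of a rewritten comment line ----
theorem pv_lstrip_replicate_append (k : Nat) (x : List Char) :
    PySem.Chars.lstrip (List.replicate k ' ' ++ x) = PySem.Chars.lstrip x := by
  induction k with
  | zero => simp
  | succ n ih =>
    have h : PySem.Chars.isspace ' ' = true := by decide
    simp only [List.replicate_succ, List.cons_append, PySem.Chars.lstrip, List.dropWhile_cons, h,
      if_true] at *
    exact ih

theorem pv_prefix_of_suffix_reverse {a b : List Char} (h : a <:+ b.reverse) : a.reverse <+: b := by
  have hb : b = b.reverse.reverse := by simp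
  rw [hb]
  exact List.reverse_prefix.mpr h

theorem pv_lstrip_prefix_fixed {y z : List Char} (hy : PySem.Chars.lstrip y = y)
    (hz : z <+: y) : PySem.Chars.lstrip z = z := by
  cases z with
  | nil => simp [PySem.Chars.lstrip]
  | cons c t =>
    rcases hz with ⟨r, hr⟩
    subst hr
    simp only [PySem.Chars.lstrip] at hy ⊢
    cases hc : PySem.Chars.isspace c with
    | false => simp [List.dropWhile, hc]
    | true =>
      exfalso
      rw [List.cons_append, List.dropWhile_cons] at hy
      simp only [hc, if_true] at hy
      have h1 := List.length_dropWhile_le PySem.Chars.isspace (t ++ r)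
      have h2 := congrArg List.length hy
      simp [List.length_append] at h1 h2
      omega

theorem pv_lstrip_rstrip {y : List Char} (hy : PySem.Chars.lstrip y = y) :
    PySem.Chars.lstrip (PySem.Chars.rstrip y) = PySem.Chars.rstrip y := by
  apply pv_lstrip_prefix_fixed hy
  exact pv_prefix_of_suffix_reverse (List.dropWhile_suffix _)

theorem pv_lstrip_idem (x : List Char) :
    PySem.Chars.lstrip (PySem.Chars.lstrip x) = PySem.Chars.lstrip x := by
  simp [PySem.Chars.lstrip, List.dropWhile_idempotent]

theorem pv_rstrip_idem (x : List Char) :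
    PySem.Chars.rstrip (PySem.Chars.rstrip x) = PySem.Chars.rstrip x := by
  simp [PySem.Chars.rstrip, List.dropWhile_idempotent]

theorem pv_strip_rewrite (k : Nat) (l : List Char) :
    PySem.Chars.strip (List.replicate k ' ' ++ PySem.Chars.strip l) = PySem.Chars.strip l := by
  simp only [PySem.Chars.strip]
  rw [pv_lstrip_replicate_append]
  rw [pv_lstrip_rstrip (pv_lstrip_idem l), pv_rstrip_idem]

-- ---- functional characterisation of A's loop ----
-- state update and line rewrite performed by A at one line, given the loop state (icb, ci),
-- whether the line is at index 0 (aS) and whether the previous line is a comment line (pf)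
def pvSt2 (l : List Char) (icb : Bool) (ci : Nat) (aS pf : Bool) : Bool × Nat :=
  if PySem.Chars.startswith (PySem.Chars.strip l) ['#'] = true then
    (if icb = false ∧ aS = false ∧ pf = false then
      (true, l.length - (PySem.Chars.lstrip l).length)
    else (icb, ci))
  else (false, ci)

def pvLine (l : List Char) (icb : Bool) (ci : Nat) (aS pf : Bool) : List Char :=
  if PySem.Chars.startswith (PySem.Chars.strip l) ['#'] = true then
    (if (pvSt2 l icb ci aS pf).1 = true ∧ l.length - (PySem.Chars.lstrip l).length ≠ (pvSt2 l icb ci aS pf).2 ∧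
        PySem.Chars.strip l ≠ ['#'] then
      List.replicate (pvSt2 l icb ci aS pf).2 ' ' ++ PySem.Chars.strip l
    else l)
  else l

def pvScan : List (List Char) → Bool → Nat → Bool → Bool → List (List Char)
  | [], _, _, _, _ => []
  | l :: t, icb, ci, aS, pf =>
    pvLine l icb ci aS pf ::
      pvScan t (pvSt2 l icb ci aS pf).1 (pvSt2 l icb ci aS pf).2 false (pvIsComment l)

def pvPF (done : List (List Char)) : Bool :=
  match done.getLast? with
  | none => false
  | some l => pvIsComment l

theorem pvIsComment_pvLine (l : List Char) (icb : Bool) (ci : Nat) (aS pf : Bool) :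
    pvIsComment (pvLine l icb ci aS pf) = pvIsComment l := by
  unfold pvLine
  split_ifs with h1 h2
  · simp only [pvIsComment, pv_strip_rewrite]
  · rfl
  · rfl

theorem pv_fixA_step_eq (done : List (List Char)) (l : List Char) (t : List (List Char))
    (icb : Bool) (ci : Nat) :
    fixA_step (done ++ l :: t, icb, ci) done.length
      = (done ++ pvLine l icb ci done.isEmpty (pvPF done) :: t,
         pvSt2 l icb ci done.isEmpty (pvPF done)) := by
  have hget : (done ++ l :: t).getD done.length [] = l := by simp [List.getD]
  have hset : ∀ v : List Char, (done ++ l :: t).set done.length v = done ++ v :: t := by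
    intro v; rw [List.set_append]; simp
  have hcond : (icb = false ∧ 0 < done.length ∧
      PySem.Chars.startswith
        (PySem.Chars.strip ((done ++ l :: t).getD (done.length - 1) [])) ['#'] = false)
      ↔ (icb = false ∧ done.isEmpty = false ∧ pvPF done = false) := by
    cases done with
    | nil => simp [pvPF]
    | cons d ds =>
      have hlt : (d :: ds).length - 1 < (d :: ds).length := by simp
      have hp : ((d :: ds) ++ l :: t).getD ((d :: ds).length - 1) []
          = (d :: ds).getD ((d :: ds).length - 1) [] := by
        have h1 : (d :: ds).length - 1 < ((d :: ds) ++ l :: t).length := by simp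
        rw [List.getD_eq_getElem _ _ h1, List.getD_eq_getElem _ _ hlt]
        exact List.getElem_append_left hlt
      have hlast : (d :: ds).getD ((d :: ds).length - 1) [] = (d :: ds).getLast (by simp) := by
        rw [List.getD_eq_getElem _ _ hlt, List.getLast_eq_getElem]
      rw [hp, hlast]
      have hq : (d :: ds).getLast? = some ((d :: ds).getLast (by simp)) :=
        List.getLast?_eq_some_getLast (by simp)
      simp [pvPF, hq, pvIsComment]
  by_cases hF : PySem.Chars.startswith (PySem.Chars.strip l) ['#'] = true
  · simp only [fixA_step, hget, hF, if_true, hcond, pvSt2, pvLine]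
    split_ifs with h1 h2 <;> simp [hset]
  · simp [fixA_step, hF, pvSt2, pvLine]

theorem pv_loop_eq (todo : List (List Char)) : ∀ (done : List (List Char)) (icb : Bool) (ci : Nat),
    ((List.range' done.length todo.length).foldl fixA_step (done ++ todo, icb, ci)).1
      = done ++ pvScan todo icb ci done.isEmpty (pvPF done) := by
  induction todo with
  | nil => intro done icb ci; simp [pvScan]
  | cons l t ih =>
    intro done icb ci
    simp only [List.length_cons]
    rw [List.range'_succ, List.foldl_cons, pv_fixA_step_eq]
    have h1 : done ++ pvLine l icb ci done.isEmpty (pvPF done) :: t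
        = (done ++ [pvLine l icb ci done.isEmpty (pvPF done)]) ++ t := by simp
    have h2 : done.length + 1 = (done ++ [pvLine l icb ci done.isEmpty (pvPF done)]).length := by
      simp
    rw [h1, h2, ih]
    have h3 : pvPF (done ++ [pvLine l icb ci done.isEmpty (pvPF done)]) = pvIsComment l := by
      simp [pvPF, pvIsComment_pvLine]
    have h4 : (done ++ [pvLine l icb ci done.isEmpty (pvPF done)]).isEmpty = false := by simp
    simp [pvScan, h3, h4]

-- ---- pvSpan facts ----
theorem pvSpan_append : ∀ ls : List (List Char), (pvSpan ls).1 ++ (pvSpan ls).2 = ls := by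
  intro ls
  induction ls with
  | nil => simp [pvSpan]
  | cons l t ih =>
    by_cases h : pvIsComment l = true
    · simp [pvSpan, h, ih]
    · simp [pvSpan, h]

theorem pvSpan_fst_flag : ∀ (ls : List (List Char)) (l : List Char), l ∈ (pvSpan ls).1 →
    pvIsComment l = true := by
  intro ls
  induction ls with
  | nil => simp [pvSpan]
  | cons x t ih =>
    intro l hl
    by_cases h : pvIsComment x = true
    · simp [pvSpan, h] at hl
      rcases hl with rfl | hl
      · exact h
      · exact ih l hl
    · simp [pvSpan, h] at hl
  
theorem pvSpan_snd_head : ∀ ls : List (List Char),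
    (pvSpan ls).2 = [] ∨ pvIsComment ((pvSpan ls).2.headD []) = false := by
  intro ls
  induction ls with
  | nil => left; simp [pvSpan]
  | cons l t ih =>
    by_cases h : pvIsComment l = true
    · simpa [pvSpan, h] using ih
    · right; simp [pvSpan, h]

-- ---- run lemmas for pvScan ----
theorem pv_scan_tail_reset (tail : List (List Char)) (ci : Nat) (aS pf : Bool) (icb : Bool)
    (htail : tail = [] ∨ pvIsComment (tail.headD []) = false) :
    pvScan tail icb ci aS pf = pvScan tail false ci false false := by
  cases tail with
  | nil => rfl
  | cons h t' =>
    have hc : pvIsComment h = false := by simpa using htail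
    have hc' : ¬ (PySem.Chars.startswith (PySem.Chars.strip h) ['#'] = true) := by
      simpa [pvIsComment] using hc
    simp [pvScan, pvLine, pvSt2, hc, hc']

theorem pv_scan_icb_true (tail : List (List Char)) (ci : Nat) (aS pf : Bool) :
    pvScan tail true ci aS pf = pvScan tail true ci false true := by
  cases tail with
  | nil => rfl
  | cons h t' => simp [pvScan, pvSt2, pvLine]

theorem pv_scan_run (run : List (List Char)) (hrun : ∀ l ∈ run, pvIsComment l = true) :
    ∀ (tail : List (List Char)) (ci : Nat) (aS pf : Bool),
      pvScan (run ++ tail) true ci aS pf = run.map (pvNorm ci) ++ pvScan tail true ci false true := by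
  induction run with
  | nil => intro tail ci aS pf; simpa using pv_scan_icb_true tail ci aS pf
  | cons r rs ih =>
    intro tail ci aS pf
    have hr : pvIsComment r = true := hrun r (by simp)
    have hr' : PySem.Chars.startswith (PySem.Chars.strip r) ['#'] = true := by
      simpa [pvIsComment] using hr
    have hrs : ∀ l ∈ rs, pvIsComment l = true := fun l hl => hrun l (by simp [hl])
    simp [pvScan, pvSt2, pvLine, hr, hr', pvNorm, ih hrs tail ci false true]

theorem pv_scan_run_noblock (run : List (List Char)) (hrun : ∀ l ∈ run, pvIsComment l = true) :
    ∀ (tail : List (List Char)) (ci : Nat) (aS pf : Bool), (pf = true ∨ aS = true) →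
      pvScan (run ++ tail) false ci aS pf = run ++ pvScan tail false ci false true := by
  induction run with
  | nil =>
    intro tail ci aS pf h
    rcases h with rfl | rfl
    · cases tail with
      | nil => rfl
      | cons h t' => simp [pvScan, pvLine, pvSt2]
    · cases tail with
      | nil => rfl
      | cons h t' =>
        by_cases hc : PySem.Chars.startswith (PySem.Chars.strip h) ['#'] = true <;>
          simp [pvScan, pvLine, pvSt2, hc]
  | cons r rs ih =>
    intro tail ci aS pf h
    have hr : pvIsComment r = true := hrun r (by simp)
    have hr' : PySem.Chars.startswith (PySem.Chars.strip r) ['#'] = true := by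
      simpa [pvIsComment] using hr
    have hrs : ∀ l ∈ rs, pvIsComment l = true := fun l hl => hrun l (by simp [hl])
    rcases h with rfl | rfl <;>
      simp [pvScan, pvSt2, pvLine, hr, hr', ih hrs tail ci false true (Or.inl rfl)]

-- ---- pvScan = pvGo ----
theorem pv_scan_eq_go : ∀ (n : Nat) (ls : List (List Char)), ls.length ≤ n →
    ∀ (ci : Nat) (aS pf : Bool), (aS = false → pf = false) →
      pvScan ls false ci aS pf = pvGo ls aS := by
  intro n
  induction n with
  | zero =>
    intro ls hls ci aS pf _
    have : ls = [] := List.length_eq_zero_iff.mp (Nat.le_zero.mp hls)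
    subst this
    simp [pvScan, pvGo]
  | succ n ihn =>
    intro ls hls ci aS pf hpf
    cases ls with
    | nil => simp [pvScan, pvGo]
    | cons head t =>
      have hlen : t.length ≤ n := by simpa using hls
      by_cases hc : pvIsComment head = true
      · have hc' : PySem.Chars.startswith (PySem.Chars.strip head) ['#'] = true := by
          simpa [pvIsComment] using hc
        have hrun := pvSpan_fst_flag t
        have hsplit := pvSpan_append t
        have hrest := pvSpan_snd_head t
        have hrestlen : (pvSpan t).2.length ≤ n := le_trans (pvSpan_snd_len_le t) hlen
        have ht : t = (pvSpan t).1 ++ (pvSpan t).2 := hsplit.symm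
        cases aS with
        | true =>
          have key : pvScan t false ci false true
              = (pvSpan t).1 ++ pvGo (pvSpan t).2 false := by
            rw [show pvScan t false ci false true
                  = pvScan ((pvSpan t).1 ++ (pvSpan t).2) false ci false true from by rw [← ht],
              pv_scan_run_noblock (pvSpan t).1 hrun _ ci false true (Or.inl rfl),
              pv_scan_tail_reset _ ci false true false hrest,
              ihn _ hrestlen ci false false (fun _ => rfl)]
          rw [pvGo]
          simp [pvScan, pvSt2, pvLine, hc', hc, key]
        | false =>
          have hpf' : pf = false := hpf rfl
          subst hpf'
          have key : pvScan t true (head.length - (PySem.Chars.lstrip head).length) false true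
              = (pvSpan t).1.map (pvNorm (head.length - (PySem.Chars.lstrip head).length)) ++
                  pvGo (pvSpan t).2 false := by
            rw [show pvScan t true (head.length - (PySem.Chars.lstrip head).length) false true
                  = pvScan ((pvSpan t).1 ++ (pvSpan t).2) true
                      (head.length - (PySem.Chars.lstrip head).length) false true from by rw [← ht],
              pv_scan_run (pvSpan t).1 hrun _ _ false true,
              pv_scan_tail_reset _ _ false true true hrest,
              ihn _ hrestlen _ false false (fun _ => rfl)]
          rw [pvGo]
          simp [pvScan, pvSt2, pvLine, hc', hc, key]
      · have hcf : pvIsComment head = false := by simpa using hc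
        have hcf' : PySem.Chars.startswith (PySem.Chars.strip head) ['#'] = false := by
          simpa [pvIsComment] using hc
        rw [pvGo]
        simp [pvScan, pvSt2, pvLine, hcf, hcf', ihn t hlen ci false false (fun _ => rfl)]

-- ===== VERDICT (by name: the statement is the Claim_ definition above) =====
theorem fix_comment_blocks_spec : Claim_equal_fix_comment_blocks := by
  intro content _
  unfold Spec_fix_comment_blocks
  show String.ofList (PySem.Chars.join ['\n']
      ((List.range (PySem.Chars.splitOn content.toList ['\n']).length).foldl fixA_step
        (PySem.Chars.splitOn content.toList ['\n'], false, 0)).1)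
    = fix_comment_blocks_alt content
  have h := pv_loop_eq (PySem.Chars.splitOn content.toList ['\n']) [] false 0
  simp only [List.nil_append, List.length_nil, List.isEmpty_nil, pvPF, List.getLast?_nil] at h
  rw [List.range_eq_range', h,
    pv_scan_eq_go (PySem.Chars.splitOn content.toList ['\n']).length _ le_rfl 0 true false (by simp)]
  rfl
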